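-- pv_equiv track=rewrite | github.com/sivakumar0412/DSA_LEARNING_SERIES | pattern2.py | countBSTs
-- ===== SOURCE A (Python) =====
-- def countBSTs(arr):
--     n = len(arr)
--
--     # Precompute Catalan numbers up to n
--     catalan = [0] * (n + 1)
--     catalan[0] = catalan[1] = 1
--
--     for i in range(2, n + 1):
--         for j in range(i):
--             catalan[i] += catalan[j] * catalan[i - j - 1]
--
--     result = []
--
--     for val in arr:
--         left = 0
--         right = 0
--
--         for x in arr:
--             if x < val:
--                 left += 1
--             elif x > val:
--                 right += 1
--
--         result.append(catalan[left] * catalan[right])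
--
--     return result
-- ===== SOURCE B (Python) =====
-- def countBSTs(arr):
--     n = len(arr)
--
--     # Catalan numbers by the ratio recurrence C(i) = C(i-1)*2*(2i-1)//(i+1) (exact division)
--     c = 1
--     cat = [1]
--     for i in range(1, n + 1):
--         c = c * 2 * (2 * i - 1) // (i + 1)
--         cat.append(c)
--
--     s = sorted(arr)
--
--     # first-occurrence index in the sorted list = number of elements < v
--     less = {}
--     for i, v in enumerate(s):
--         if v not in less:
--             less[v] = i
--
--     # first-occurrence index in the reversed sorted list = number of elements > v
--     greater = {}
--     for i, v in enumerate(reversed(s)):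
--         if v not in greater:
--             greater[v] = i
--
--     return [cat[less[v]] * cat[greater[v]] for v in arr]
-- ===== Notes on version B (the rewrite author's own statement) =====
-- stated objective: faster
-- what changed: Replaces the O(n^2) Catalan convolution DP with the O(n) ratio recurrence C(i)=C(i-1)*2*(2i-1)//(i+1), and replaces the per-element O(n) less/greater scan with one sort plus first-occurrence-index dictionaries over the sorted list and its reverse.
-- outside the precondition, e.g. on countBSTs([]): A raises IndexError, B returns []
import Mathlib
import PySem

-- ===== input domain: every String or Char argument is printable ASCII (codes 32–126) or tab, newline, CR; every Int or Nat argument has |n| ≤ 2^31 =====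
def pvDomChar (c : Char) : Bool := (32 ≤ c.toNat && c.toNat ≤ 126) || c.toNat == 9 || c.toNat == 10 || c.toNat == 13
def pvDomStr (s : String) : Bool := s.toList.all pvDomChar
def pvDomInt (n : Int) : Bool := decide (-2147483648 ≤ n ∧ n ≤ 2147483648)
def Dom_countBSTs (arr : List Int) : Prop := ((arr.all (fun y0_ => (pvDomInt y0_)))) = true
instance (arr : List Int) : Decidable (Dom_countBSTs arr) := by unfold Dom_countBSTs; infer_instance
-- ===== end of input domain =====

-- B replaces A's O(n^2) Catalan convolution DP and per-element scans by the O(n) Catalan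
-- ratio recurrence plus one sort with first-occurrence-index dictionaries (objective: faster).


-- ===== PORT A =====
def countBSTs (arr : List Int) : List Int :=
  let n := arr.length
  -- the Catalan table of A; its index-1 assignment raises IndexError when n = 0 (excluded by Pre_)
  let cat0 : List Int := (List.replicate (n + 1) (0 : Int)).set 1 1 |>.set 0 1
  let cat := (PySem.List.pyRange 2 ((n : Int) + 1) 1).foldl (fun c i =>
    (PySem.List.pyRange 0 i 1).foldl (fun c j =>
      c.set i.toNat (PySem.List.pyGetD c i 0 +
        PySem.List.pyGetD c j 0 * PySem.List.pyGetD c (i - j - 1) 0)) c) cat0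
  arr.foldl (fun result val =>
    let lr := arr.foldl (fun (lr : Int × Int) x =>
      if x < val then (lr.1 + 1, lr.2)
      else if x > val then (lr.1, lr.2 + 1)
      else lr) (0, 0)
    result ++ [PySem.List.pyGetD cat lr.1 0 * PySem.List.pyGetD cat lr.2 0]) []

-- ===== PORT B =====
-- first-occurrence-index dictionary of B's 'for i, v in enumerate(...): if v not in d: d[v] = i'
def pvFirstIdx (s : List Int) : PySem.Dict Int Int :=
  (PySem.List.enumerate s).foldl (fun d p =>
    if d.contains p.2 then d else d.insert p.2 p.1) PySem.Dict.empty

def countBSTs_alt (arr : List Int) : List Int :=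
  let n := arr.length
  let cc := (PySem.List.pyRange 1 ((n : Int) + 1) 1).foldl (fun (p : Int × List Int) i =>
    let c := PySem.Int.floordiv (p.1 * 2 * (2 * i - 1)) (i + 1)
    (c, p.2 ++ [c])) (1, [1])
  let cat := cc.2
  let s := PySem.List.sorted arr (fun x => x) false
  let less := pvFirstIdx s
  let greater := pvFirstIdx s.reverse
  arr.map (fun v =>
    PySem.List.pyGetD cat (less.getD v 0) 0 * PySem.List.pyGetD cat (greater.getD v 0) 0)

-- ===== PRECONDITION & SPEC =====
-- On the empty list A raises IndexError (it assigns the second Catalan table entry into a length-1 table); Pre_ excludes exactly the empty list, where B naturally returns an empty result.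
def Pre_countBSTs (arr : List Int) : Prop := arr ≠ []
instance (arr : List Int) : Decidable (Pre_countBSTs arr) := by unfold Pre_countBSTs; infer_instance
def pvWitness_countBSTs : List Int := [3, 1, 2, 1]

def Spec_countBSTs (arr : List Int) (out : List Int) : Prop := out = countBSTs_alt arr
instance (arr : List Int) (out : List Int) : Decidable (Spec_countBSTs arr out) := by unfold Spec_countBSTs; infer_instance

-- ===== CLAIM (what is proved, stated in full; the proofs are below) =====
def Claim_equal_countBSTs : Prop := ∀ (arr : List Int), Dom_countBSTs arr → Pre_countBSTs arr → Spec_countBSTs arr (countBSTs arr)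
-- ===== LEMMAS AND PROOFS =====

-- loop characterisations
-- (A's inner counting loop)
theorem pvPairCount (arr : List Int) (val : Int) (a b : Int) :
    arr.foldl (fun (lr : Int × Int) x =>
      if x < val then (lr.1 + 1, lr.2)
      else if x > val then (lr.1, lr.2 + 1)
      else lr) (a, b) =
    (a + (arr.countP (fun x => decide (x < val)) : Int), b + (arr.countP (fun x => decide (val < x)) : Int)) := by
  induction arr generalizing a b with
  | nil => simp
  | cons x t ih =>
    simp only [List.foldl_cons, List.countP_cons]
    by_cases h1 : x < val
    · have h2 : ¬ val < x := not_lt.mpr h1.le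
      simp only [if_pos h1, ih, h1, h2, decide_true, decide_false]
      simp only [if_true, Bool.false_eq_true, if_false, Prod.mk.injEq]
      exact ⟨by push_cast; ring, by push_cast; ring⟩
    · by_cases h2 : val < x
      · simp only [if_neg h1, if_pos h2, ih, h1, h2, decide_true, decide_false]
        simp only [if_true, Bool.false_eq_true, if_false, Prod.mk.injEq]
        exact ⟨by push_cast; ring, by push_cast; ring⟩
      · simp only [if_neg h1, if_neg h2, ih, h1, h2, decide_false]
        simp only [Bool.false_eq_true, if_false, Prod.mk.injEq]
        exact ⟨by push_cast; ring, by push_cast; ring⟩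

-- dict first-index fold
theorem pvFoldGet (s : List Int) (k : Int) (d : PySem.Dict Int Int) (v : Int) :
    ((PySem.List.enumerate s k).foldl (fun d p =>
        if d.contains p.2 then d else d.insert p.2 p.1) d).get? v =
      (d.get? v).or ((PySem.List.index? s v).map (fun i : Nat => k + i)) := by
  induction s generalizing k d with
  | nil => simp [PySem.List.enumerate_nil, PySem.List.index?]
  | cons x t ih =>
    rw [PySem.List.enumerate_cons]
    simp only [List.foldl_cons]
    by_cases hc : d.contains x
    · simp only [hc, if_true, ih]
      by_cases hv : v = x
      · subst hv
        have : (d.get? v).isSome := by rw [← PySem.Dict.contains_eq_isSome_get?]; exact hc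
        obtain ⟨w, hw⟩ := Option.isSome_iff_exists.mp this
        simp [hw]
      · rw [PySem.List.index?_cons_of_ne t (Ne.symm hv), Option.map_map]
        congr 2
        funext i
        simp; ring
    · simp only [hc, Bool.false_eq_true, if_false, ih]
      by_cases hv : v = x
      · subst hv
        have hd : d.get? v = none := by
          cases h : d.get? v with
          | none => rfl
          | some w => rw [PySem.Dict.contains_eq_isSome_get?, h] at hc; simp at hc
        rw [PySem.Dict.get?_insert, if_pos rfl, hd]
        rw [PySem.List.index?_cons_self]
        simp
      · rw [PySem.Dict.get?_insert, if_neg hv]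
        rw [PySem.List.index?_cons_of_ne t (Ne.symm hv), Option.map_map]
        congr 2
        funext i
        simp; ring

theorem pvIdxSortedLe (s : List Int) (hs : s.Pairwise (· ≤ ·)) (v : Int) (hv : v ∈ s) :
    PySem.List.index? s v = some (s.countP (fun x => decide (x < v))) := by
  induction s with
  | nil => cases hv
  | cons h t ih =>
    rw [List.pairwise_cons] at hs
    by_cases hvh : v = h
    · subst hvh
      rw [PySem.List.index?_cons_self]
      have hz : List.countP (fun x => decide (x < v)) (v :: t) = 0 := by
        rw [List.countP_eq_zero]
        intro a ha
        rcases List.mem_cons.mp ha with rfl | ha'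
        · simp
        · simpa using not_lt.mpr (hs.1 a ha')
      rw [hz]
    · have hvt : v ∈ t := (List.mem_cons.mp hv).resolve_left hvh
      rw [PySem.List.index?_cons_of_ne t (Ne.symm hvh), ih hs.2 hvt]
      have hlt : h < v := lt_of_le_of_ne (hs.1 v hvt) (fun e => hvh e.symm)
      simp [List.countP_cons, hlt, Nat.add_comm]

theorem pvIdxSortedGe (s : List Int) (hs : s.Pairwise (· ≥ ·)) (v : Int) (hv : v ∈ s) :
    PySem.List.index? s v = some (s.countP (fun x => decide (v < x))) := by
  induction s with
  | nil => cases hv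
  | cons h t ih =>
    rw [List.pairwise_cons] at hs
    by_cases hvh : v = h
    · subst hvh
      rw [PySem.List.index?_cons_self]
      have hz : List.countP (fun x => decide (v < x)) (v :: t) = 0 := by
        rw [List.countP_eq_zero]
        intro a ha
        rcases List.mem_cons.mp ha with rfl | ha'
        · simp
        · simpa using not_lt.mpr (hs.1 a ha')
      rw [hz]
    · have hvt : v ∈ t := (List.mem_cons.mp hv).resolve_left hvh
      rw [PySem.List.index?_cons_of_ne t (Ne.symm hvh), ih hs.2 hvt]
      have hlt : v < h := lt_of_le_of_ne (hs.1 v hvt) hvh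
      simp [List.countP_cons, hlt, Nat.add_comm]

theorem pvLess (arr : List Int) (v : Int) (hv : v ∈ arr) :
    (pvFirstIdx (PySem.List.sorted arr (fun x => x) false)).getD v 0 =
      (arr.countP (fun x => decide (x < v)) : Int) := by
  set s := PySem.List.sorted arr (fun x => x) false with hsdef
  have hperm : s.Perm arr := PySem.List.sorted_perm arr (fun x => x) false
  have hvs : v ∈ s := hperm.mem_iff.mpr hv
  have hp : s.Pairwise (· ≤ ·) := PySem.List.sorted_pairwise arr (fun x => x)
  have hidx := pvIdxSortedLe s hp v hvs
  unfold pvFirstIdx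
  rw [PySem.Dict.getD_eq_get?_getD, pvFoldGet s 0 PySem.Dict.empty v]
  rw [PySem.Dict.get?_empty, Option.none_or, hidx]
  simp [hperm.countP_eq]

theorem pvGreater (arr : List Int) (v : Int) (hv : v ∈ arr) :
    (pvFirstIdx (PySem.List.sorted arr (fun x => x) false).reverse).getD v 0 =
      (arr.countP (fun x => decide (v < x)) : Int) := by
  set s := PySem.List.sorted arr (fun x => x) false with hsdef
  have hperm : s.Perm arr := PySem.List.sorted_perm arr (fun x => x) false
  have hvs : v ∈ s.reverse := by simpa using hperm.mem_iff.mpr hv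
  have hp : s.reverse.Pairwise (· ≥ ·) := by
    rw [List.pairwise_reverse]
    exact PySem.List.sorted_pairwise arr (fun x => x)
  have hidx := pvIdxSortedGe s.reverse hp v hvs
  unfold pvFirstIdx
  rw [PySem.Dict.getD_eq_get?_getD, pvFoldGet s.reverse 0 PySem.Dict.empty v]
  rw [PySem.Dict.get?_empty, Option.none_or, hidx]
  have : List.countP (fun x => decide (v < x)) s.reverse = List.countP (fun x => decide (v < x)) arr := by
    rw [List.countP_reverse]
    exact hperm.countP_eq _
  simp [this]

-- Catalan
def pvCat (n : Nat) : List Int := (List.range (n + 1)).map (fun i => (catalan i : Int))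

theorem pvCatStep (n : Nat) : (n + 2) * catalan (n + 1) = 2 * (2 * n + 1) * catalan n := by
  have h1 := succ_mul_catalan_eq_centralBinom (n + 1)
  have h2 := Nat.succ_mul_centralBinom_succ n
  have h3 := succ_mul_catalan_eq_centralBinom n
  have key : (n + 1) * ((n + 2) * catalan (n + 1)) = (n + 1) * (2 * (2 * n + 1) * catalan n) := by
    calc (n + 1) * ((n + 2) * catalan (n + 1)) = (n + 1) * Nat.centralBinom (n + 1) := by rw [h1]
    _ = 2 * (2 * n + 1) * Nat.centralBinom n := h2
    _ = 2 * (2 * n + 1) * ((n + 1) * catalan n) := by rw [h3]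
    _ = (n + 1) * (2 * (2 * n + 1) * catalan n) := by ring
  exact Nat.eq_of_mul_eq_mul_left (by omega) key

theorem pvCatB (n : Nat) :
    ((PySem.List.pyRange 1 ((n : Int) + 1) 1).foldl (fun (p : Int × List Int) i =>
      let c := PySem.Int.floordiv (p.1 * 2 * (2 * i - 1)) (i + 1)
      (c, p.2 ++ [c])) (1, [1])) = ((catalan n : Int), pvCat n) := by
  induction n with
  | zero =>
    rw [PySem.List.pyRange_one_eq_nil (by norm_num)]
    simp [pvCat]
  | succ m ih =>
    have hcast : ((m + 1 : Nat) : Int) + 1 = ((m : Int) + 1) + 1 := by push_cast; ring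
    rw [hcast, PySem.List.pyRange_one_succ_right (by omega), List.foldl_append, ih]
    simp only [List.foldl_cons, List.foldl_nil]
    have hc : PySem.Int.floordiv ((catalan m : Int) * 2 * (2 * ((m : Int) + 1) - 1)) (((m : Int) + 1) + 1)
        = (catalan (m + 1) : Int) := by
      have hnum : (catalan m : Int) * 2 * (2 * ((m : Int) + 1) - 1) = (catalan (m + 1) : Int) * (((m : Int) + 1) + 1) := by
        have h : ((m : Int) + 2) * (catalan (m + 1) : Int) = 2 * (2 * (m : Int) + 1) * (catalan m : Int) := by
          exact_mod_cast pvCatStep m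
        linear_combination -h
      rw [hnum, PySem.Int.floordiv_eq_ediv_of_pos (by positivity)]
      exact Int.mul_ediv_cancel _ (by positivity)
    rw [hc]
    simp only [Prod.mk.injEq, true_and]
    show pvCat m ++ [(catalan (m + 1) : Int)] = pvCat (m + 1)
    unfold pvCat
    rw [List.range_succ (n := m + 1), List.map_append]
    rfl

def pvMapPart (k : Nat) : List Int := (List.range (k + 1)).map (fun i => (catalan i : Int))
def pvT (n k : Nat) : List Int := pvMapPart k ++ List.replicate (n - k) 0

theorem pvMapPart_len (k : Nat) : (pvMapPart k).length = k + 1 := by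
  simp [pvMapPart]

theorem pvMapPart_get (k j : Nat) (hj : j ≤ k) : (pvMapPart k)[j]? = some ((catalan j : Int)) := by
  unfold pvMapPart
  rw [List.getElem?_map, List.getElem?_range (by omega)]
  rfl

theorem pvT_split (n k : Nat) (h : k < n) :
    pvT n k = pvMapPart k ++ 0 :: List.replicate (n - k - 1) 0 := by
  unfold pvT
  congr 1
  have : n - k = (n - k - 1) + 1 := by omega
  rw [this, List.replicate_succ]
  simp

-- the inner convolution loop of A, at outer index i = k+1
theorem pvInner (n k : Nat) (hk : k < n) (m : Nat) (hm : m ≤ k + 1) :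
    (PySem.List.pyRange 0 (m : Int) 1).foldl (fun c j =>
      c.set ((k : Int) + 1).toNat (PySem.List.pyGetD c ((k : Int) + 1) 0 +
        PySem.List.pyGetD c j 0 * PySem.List.pyGetD c (((k : Int) + 1) - j - 1) 0)) (pvT n k)
    = pvMapPart k ++ (∑ j ∈ Finset.range m, (catalan j : Int) * (catalan (k - j) : Int)) ::
        List.replicate (n - k - 1) 0 := by
  induction m with
  | zero =>
    rw [show ((0 : Nat) : Int) = 0 by rfl, PySem.List.pyRange_one_eq_nil (by omega)]
    simpa using pvT_split n k hk
  | succ m ih =>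
    have hm' : m ≤ k + 1 := by omega
    have hcast : ((m + 1 : Nat) : Int) = (m : Int) + 1 := by push_cast; ring
    rw [hcast, PySem.List.pyRange_one_succ_right (by omega), List.foldl_append, ih hm']
    simp only [List.foldl_cons, List.foldl_nil]
    set L := pvMapPart k ++ (∑ j ∈ Finset.range m, (catalan j : Int) * (catalan (k - j) : Int)) ::
        List.replicate (n - k - 1) 0 with hL
    have hmk : m ≤ k := by omega
    have hconv : (((k : Int) + 1).toNat) = k + 1 := by omega
    have hLlen : (k + 1 : Nat) < L.length := by simp [hL, pvMapPart_len]
    have hgi : PySem.List.pyGetD L ((k : Int) + 1) 0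
        = ∑ j ∈ Finset.range m, (catalan j : Int) * (catalan (k - j) : Int) := by
      have : ((k : Int) + 1) = ((k + 1 : Nat) : Int) := by push_cast; ring
      rw [this, PySem.List.pyGetD_natCast, List.getD_eq_getElem?_getD,
        List.getElem?_append_right (by rw [pvMapPart_len]), pvMapPart_len]
      simp
    have hgj : PySem.List.pyGetD L ((m : Nat) : Int) 0 = (catalan m : Int) := by
      rw [PySem.List.pyGetD_natCast, List.getD_eq_getElem?_getD,
        List.getElem?_append_left (by rw [pvMapPart_len]; omega), pvMapPart_get k m hmk]
      rfl
    have hgk : PySem.List.pyGetD L (((k : Int) + 1) - (m : Int) - 1) 0 = (catalan (k - m) : Int) := by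
      have : ((k : Int) + 1) - (m : Int) - 1 = ((k - m : Nat) : Int) := by push_cast [hmk]; ring
      rw [this, PySem.List.pyGetD_natCast, List.getD_eq_getElem?_getD,
        List.getElem?_append_left (by rw [pvMapPart_len]; omega), pvMapPart_get k (k - m) (by omega)]
      rfl
    rw [hgi, hgj, hgk, hconv, hL]
    rw [List.set_append, pvMapPart_len, if_neg (by omega)]
    have h0 : k + 1 - (k + 1) = 0 := by omega
    rw [h0, List.set_cons_zero, Finset.sum_range_succ]

theorem pvSumCatalan (k : Nat) :
    (∑ j ∈ Finset.range (k + 1), (catalan j : Int) * (catalan (k - j) : Int)) = (catalan (k + 1) : Int) := by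
  rw [catalan_succ k]
  push_cast [← Fin.sum_univ_eq_sum_range (fun j => (catalan j : Int) * (catalan (k - j) : Int)) (k + 1)]
  rfl

theorem pvOuter (n k : Nat) (h1 : 1 ≤ k) (hk : k ≤ n) :
    (PySem.List.pyRange 2 ((k : Int) + 1) 1).foldl (fun c i =>
      (PySem.List.pyRange 0 i 1).foldl (fun c j =>
        c.set i.toNat (PySem.List.pyGetD c i 0 +
          PySem.List.pyGetD c j 0 * PySem.List.pyGetD c (i - j - 1) 0)) c) (pvT n 1)
    = pvT n k := by
  induction k with
  | zero => omega
  | succ m ih =>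
    by_cases hm : m = 0
    · subst hm
      rw [show ((1 : Nat) : Int) + 1 = 2 by rfl, PySem.List.pyRange_one_eq_nil (by omega)]
      rfl
    · have hm1 : 1 ≤ m := by omega
      have hcast : ((m + 1 : Nat) : Int) + 1 = ((m : Int) + 1) + 1 := by push_cast; ring
      rw [hcast, PySem.List.pyRange_one_succ_right (by omega), List.foldl_append,
        ih hm1 (by omega)]
      simp only [List.foldl_cons, List.foldl_nil]
      have hstep : (PySem.List.pyRange 0 ((m : Int) + 1) 1).foldl (fun c j =>
          c.set ((m : Int) + 1).toNat (PySem.List.pyGetD c ((m : Int) + 1) 0 +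
            PySem.List.pyGetD c j 0 * PySem.List.pyGetD c (((m : Int) + 1) - j - 1) 0)) (pvT n m)
          = pvMapPart m ++ (∑ j ∈ Finset.range (m + 1), (catalan j : Int) * (catalan (m - j) : Int)) ::
              List.replicate (n - m - 1) 0 := by
        have := pvInner n m (by omega) (m + 1) (le_refl _)
        rw [show ((m + 1 : Nat) : Int) = (m : Int) + 1 by push_cast; ring] at this
        exact this
      rw [hstep, pvSumCatalan m]
      show pvMapPart m ++ (catalan (m + 1) : Int) :: List.replicate (n - m - 1) 0 = pvT n (m + 1)
      unfold pvT pvMapPart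
      rw [List.range_succ (n := m + 1), List.map_append]
      simp only [List.map_cons, List.map_nil, List.append_assoc, List.cons_append, List.nil_append]
      congr 2

def pvCat0 (n : Nat) : List Int := ((List.replicate (n + 1) (0 : Int)).set 1 1).set 0 1

theorem pvCat0_eq (n : Nat) (hn : 1 ≤ n) : pvCat0 n = pvT n 1 := by
  obtain ⟨p, rfl⟩ : ∃ p, n = p + 1 := ⟨n - 1, by omega⟩
  unfold pvCat0 pvT pvMapPart
  rw [show p + 1 + 1 = p + 2 by ring]
  rw [List.replicate_succ, List.replicate_succ]
  simp [List.set_cons_zero, catalan_zero, catalan_one, List.range_succ]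

theorem pvCatA (n : Nat) (hn : 1 ≤ n) :
    (PySem.List.pyRange 2 ((n : Int) + 1) 1).foldl (fun c i =>
      (PySem.List.pyRange 0 i 1).foldl (fun c j =>
        c.set i.toNat (PySem.List.pyGetD c i 0 +
          PySem.List.pyGetD c j 0 * PySem.List.pyGetD c (i - j - 1) 0)) c) (pvCat0 n)
    = pvCat n := by
  rw [pvCat0_eq n hn, pvOuter n n hn (le_refl n)]
  unfold pvT pvCat pvMapPart
  simp

-- ===== VERDICT (by name: the statement is the Claim_ definition above) =====
theorem countBSTs_spec : Claim_equal_countBSTs := by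
  intro arr _ hpre
  have hn : 1 ≤ arr.length := List.length_pos_iff.mpr hpre
  unfold Spec_countBSTs
  simp only [countBSTs, countBSTs_alt]
  rw [show ((List.replicate (arr.length + 1) (0 : Int)).set 1 1).set 0 1 = pvCat0 arr.length from rfl]
  rw [pvCatA arr.length hn, (Prod.ext_iff.mp (pvCatB arr.length)).2]
  rw [PySem.List.foldl_append_singleton_eq_map
    (f := fun val => PySem.List.pyGetD (pvCat arr.length)
        ((arr.foldl (fun (lr : Int × Int) x =>
          if x < val then (lr.1 + 1, lr.2)
          else if x > val then (lr.1, lr.2 + 1)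
          else lr) (0, 0)).1) 0 *
      PySem.List.pyGetD (pvCat arr.length)
        ((arr.foldl (fun (lr : Int × Int) x =>
          if x < val then (lr.1 + 1, lr.2)
          else if x > val then (lr.1, lr.2 + 1)
          else lr) (0, 0)).2) 0)]
  rw [List.nil_append]
  apply List.map_congr_left
  intro v hv
  rw [pvPairCount arr v 0 0, pvLess arr v hv, pvGreater arr v hv]
  simp
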